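-- pv_equiv track=rewrite | github.com/pypi-data/pypi-mirror-403 | packages/synapse-sdk/synapse_sdk-2026.1.23.tar.gz/synapse_sdk-2026.1.23/scripts/fix_mdx.py | escape_curly_braces
-- ===== SOURCE A (Python) =====
-- def escape_curly_braces(content: str) -> str:
--     """Escape { and } outside of code blocks."""
--     lines = content.split('\n')
--     result = []
--     in_code_block = False
--
--     for line in lines:
--         # Track code block state
--         if line.strip().startswith('```'):
--             in_code_block = not in_code_block
--             result.append(line)
--             continue
--
--         if in_code_block:
--             result.append(line)
--         else:
--             # Escape curly braces outside code blocks
--             line = line.replace('{', '\\{').replace('}', '\\}')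
--             result.append(line)
--
--     return '\n'.join(result)
-- ===== SOURCE B (Python) =====
-- def escape_curly_braces(content: str) -> str:
--     """Escape { and } outside of code blocks (streaming partition-based pass)."""
--     out = []
--     in_code = False
--     rest = content
--     while True:
--         line, sep, tail = rest.partition('\n')
--         if line.lstrip()[:3] == '```':
--             in_code = not in_code
--             out.append(line)
--         elif in_code:
--             out.append(line)
--         else:
--             out.append(''.join('\\' + c if c in '{}' else c for c in line))
--         if not sep:
--             break
--         out.append(sep)
--         rest = tail
--     return ''.join(out)
-- ===== Notes on version B (the rewrite author's own statement) =====
-- stated objective: alternative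
-- what changed: B replaces A's split-into-lines / state-flag / join pipeline with a single streaming pass that repeatedly partitions off the next line with str.partition, classifies a fence line by comparing the first three characters of the lstripped line instead of strip().startswith, and escapes braces char-by-char in one generator join instead of two sequential str.replace passes, emitting separators inline.
import Mathlib
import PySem

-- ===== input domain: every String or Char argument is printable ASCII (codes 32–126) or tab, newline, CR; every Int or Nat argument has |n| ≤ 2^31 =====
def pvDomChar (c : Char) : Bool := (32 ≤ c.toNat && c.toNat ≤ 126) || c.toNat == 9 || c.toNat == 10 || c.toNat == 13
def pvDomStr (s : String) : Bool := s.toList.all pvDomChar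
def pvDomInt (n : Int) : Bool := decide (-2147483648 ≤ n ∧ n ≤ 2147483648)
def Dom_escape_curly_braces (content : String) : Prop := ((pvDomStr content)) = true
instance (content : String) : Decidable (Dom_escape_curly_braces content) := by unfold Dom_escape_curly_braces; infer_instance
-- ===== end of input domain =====

-- B replaces A's split/flag/join pipeline with one streaming pass that partitions off one line
-- at a time and escapes braces char-by-char (objective: alternative decomposition, same cost).

-- ===== PORT A =====
def escape_curly_braces (content : String) : String :=
  let lines := (PySem.Str.split? content "\n").getD []   -- content.split('\n'); sep is the nonempty literal '\n', so split? is always `some`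
  let st := lines.foldl (fun (st : List String × Bool) line =>
    if PySem.Str.startswith (PySem.Str.strip line) "```" then (st.1 ++ [line], !st.2)
    else if st.2 then (st.1 ++ [line], st.2)
    else (st.1 ++ [PySem.Str.replace (PySem.Str.replace line "{" "\\{") "}" "\\}"], st.2))
    ([], false)
  PySem.Str.join "\n" st.1

-- ===== PORT B =====
-- '\\' + c if c in '{}' else c  (one element of Source B's generator)
def pvEsc (c : Char) : List Char := if c = '{' || c = '}' then ['\\', c] else [c]

-- Source B's while-loop over `rest`: partition('\n') is takeWhile/dropWhile on the char list
def pvScanB (cs : List Char) (inCode : Bool) : List Char :=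
  let line := cs.takeWhile (· != '\n')
  let fence := PySem.Chars.slice (PySem.Chars.lstrip line) none (some 3) = "```".toList
  let outLine := if fence then line else if inCode then line else line.flatMap pvEsc
  match _h : cs.dropWhile (· != '\n') with
  | [] => outLine
  | _ :: tail => outLine ++ '\n' :: pvScanB tail (if fence then !inCode else inCode)
termination_by cs.length
decreasing_by
  have h1 := List.length_dropWhile_le (· != '\n') cs
  rw [_h] at h1; simp only [List.length_cons] at h1; omega

def escape_curly_braces_alt (content : String) : String :=
  String.ofList (pvScanB content.toList false)

-- ===== PRECONDITION & SPEC =====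
def Spec_escape_curly_braces (content : String) (out : String) : Prop := out = escape_curly_braces_alt content
instance (content : String) (out : String) : Decidable (Spec_escape_curly_braces content out) := by unfold Spec_escape_curly_braces; infer_instance

-- ===== CLAIM (what is proved, stated in full; the proofs are below) =====
def Claim_equal_escape_curly_braces : Prop := ∀ (content : String), Dom_escape_curly_braces content → Spec_escape_curly_braces content (escape_curly_braces content)

-- ===== LEMMAS AND PROOFS =====

-- the list of lines of cs, structurally (equals splitOn cs ['\n'], proved below)
def pvLineSplit : List Char → List (List Char)
  | [] => [[]]
  | c :: rest => if c = '\n' then [] :: pvLineSplit rest else List.modifyHead (c :: ·) (pvLineSplit rest)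

-- A's per-line processing at char level
def pvProcA : List (List Char) → Bool → List (List Char)
  | [], _ => []
  | l :: ls, b =>
    if PySem.Chars.startswith (PySem.Chars.strip l) "```".toList then l :: pvProcA ls (!b)
    else if b then l :: pvProcA ls b
    else PySem.Chars.replace (PySem.Chars.replace l "{".toList "\\{".toList) "}".toList "\\}".toList :: pvProcA ls b

-- A's loop body, recursively, at String level
def pvRunS : List String → Bool → List String × Bool
  | [], b => ([], b)
  | l :: ls, b =>
    if PySem.Str.startswith (PySem.Str.strip l) "```" then
      let r := pvRunS ls (!b); (l :: r.1, r.2)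
    else if b then
      let r := pvRunS ls b; (l :: r.1, r.2)
    else
      let r := pvRunS ls b;
      (PySem.Str.replace (PySem.Str.replace l "{" "\\{") "}" "\\}" :: r.1, r.2)

theorem pvLineSplit_ne_nil (cs : List Char) : pvLineSplit cs ≠ [] := by
  induction cs with
  | nil => simp [pvLineSplit]
  | cons c rest ih =>
    by_cases hc : c = '\n' <;> simp [pvLineSplit, hc]
    cases e : pvLineSplit rest with
    | nil => exact absurd e ih
    | cons h t => simp

theorem pvGoSplit (fuel : Nat) : ∀ (cs cur : List Char) (acc : List (List Char)),
    cs.length < fuel →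
    PySem.Chars.splitOn.go ['\n'] fuel cs cur acc =
      acc.reverse ++ List.modifyHead (cur.reverse ++ ·) (pvLineSplit cs) := by
  induction fuel with
  | zero => intro cs cur acc h; omega
  | succ f ih =>
    intro cs cur acc h
    cases cs with
    | nil => simp [PySem.Chars.splitOn.go, pvLineSplit]
    | cons c rest =>
      by_cases hc : c = '\n'
      · subst hc
        have hpre : List.isPrefixOf ['\n'] ('\n' :: rest) = true := by
          simp [List.isPrefixOf]
        rw [PySem.Chars.splitOn.go]
        simp only [hpre, if_true, List.length_cons, List.length_nil, Nat.zero_add,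
          List.drop_succ_cons, List.drop_zero]
        rw [ih rest [] (cur.reverse :: acc) (by simp at h; omega)]
        obtain ⟨hd, tl, e⟩ := List.exists_cons_of_ne_nil (pvLineSplit_ne_nil rest)
        simp [pvLineSplit, e, List.modifyHead]
      · have hpre : List.isPrefixOf ['\n'] (c :: rest) = false := by
          simp [List.isPrefixOf]; exact fun hh => absurd hh.symm hc
        rw [PySem.Chars.splitOn.go]
        simp only [hpre, Bool.false_eq_true, if_false]
        rw [ih rest (c :: cur) acc (by simp at h; omega)]
        obtain ⟨hd, tl, e⟩ := List.exists_cons_of_ne_nil (pvLineSplit_ne_nil rest)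
        simp [pvLineSplit, hc, e, List.modifyHead]

theorem pvSplitOn_newline (cs : List Char) :
    PySem.Chars.splitOn cs ['\n'] = pvLineSplit cs := by
  rw [PySem.Chars.splitOn, pvGoSplit (cs.length + 1) cs [] [] (by omega)]
  obtain ⟨hd, tl, e⟩ := List.exists_cons_of_ne_nil (pvLineSplit_ne_nil cs)
  simp [e, List.modifyHead]

theorem pvGoReplace (c : Char) (new : List Char) (fuel : Nat) :
    ∀ (l acc : List Char), l.length ≤ fuel →
    PySem.Chars.replace.go [c] new fuel l acc =
      acc.reverse ++ l.flatMap (fun x => if x = c then new else [x]) := by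
  induction fuel with
  | zero =>
    intro l acc h
    have : l = [] := by cases l <;> simp_all
    subst this
    simp [PySem.Chars.replace.go]
  | succ f ih =>
    intro l acc h
    cases l with
    | nil => simp [PySem.Chars.replace.go]
    | cons x t =>
      by_cases hx : x = c
      · subst hx
        have hpre : List.isPrefixOf [x] (x :: t) = true := by simp [List.isPrefixOf]
        rw [PySem.Chars.replace.go]
        simp only [hpre, if_true, List.length_cons, List.length_nil, Nat.zero_add,
          List.drop_succ_cons, List.drop_zero]
        rw [ih t (new.reverse ++ acc) (by simp at h; omega)]
        simp
      · have hpre : List.isPrefixOf [c] (x :: t) = false := by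
          simp [List.isPrefixOf]; exact fun hh => absurd hh.symm hx
        rw [PySem.Chars.replace.go]
        simp only [hpre, Bool.false_eq_true, if_false]
        rw [ih t (x :: acc) (by simp at h; omega)]
        simp [hx]

theorem pvReplaceSingle (c : Char) (new l : List Char) :
    PySem.Chars.replace l [c] new = l.flatMap (fun x => if x = c then new else [x]) := by
  rw [PySem.Chars.replace]
  simp only [List.isEmpty_cons, Bool.false_eq_true, if_false]
  rw [pvGoReplace c new l.length l [] (le_refl _)]
  simp

theorem pvFlatMapFlatMap (l : List Char) (f g : Char → List Char) :
    (l.flatMap f).flatMap g = l.flatMap (fun x => (f x).flatMap g) := by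
  induction l with
  | nil => simp
  | cons c t ih => simp [ih]

theorem pvReplaceReplace (l : List Char) :
    PySem.Chars.replace (PySem.Chars.replace l "{".toList "\\{".toList) "}".toList "\\}".toList
      = l.flatMap pvEsc := by
  have h1 : ("{" : String).toList = ['{'] := rfl
  have h2 : ("}" : String).toList = ['}'] := rfl
  have h3 : ("\\{" : String).toList = ['\\', '{'] := rfl
  have h4 : ("\\}" : String).toList = ['\\', '}'] := rfl
  rw [h1, h2, h3, h4, pvReplaceSingle, pvReplaceSingle, pvFlatMapFlatMap]
  congr 1
  funext x
  by_cases hx : x = '{'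
  · subst hx; simp [pvEsc]
  · by_cases hy : x = '}' <;> simp [pvEsc, hx, hy]

theorem pvFenceIff (l : List Char) :
    PySem.Chars.startswith (PySem.Chars.strip l) "```".toList = true ↔
      PySem.Chars.slice (PySem.Chars.lstrip l) none (some 3) = "```".toList := by
  have htl : ("```" : String).toList = ['`', '`', '`'] := rfl
  rw [htl, PySem.Chars.slice_eq_listSlice,
    PySem.List.slice_to (PySem.Chars.lstrip l) (by norm_num : (0 : Int) ≤ 3)]
  have h3 : (3 : Int).toNat = 3 := rfl
  rw [h3]
  have hstrip : PySem.Chars.strip l = PySem.Chars.rstrip (PySem.Chars.lstrip l) := rfl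
  rw [hstrip, PySem.Chars.startswith_iff]
  set m := PySem.Chars.lstrip l with hm
  constructor
  · intro hp
    have hsub : PySem.Chars.rstrip m <+: m := by
      have h2 : List.dropWhile PySem.Chars.isspace m.reverse <:+ m.reverse :=
        List.dropWhile_suffix _
      have := List.reverse_prefix.mpr h2
      rwa [List.reverse_reverse] at this
    have hpm := hp.trans hsub
    have := List.prefix_iff_eq_take.mp hpm
    simpa using this.symm
  · intro ht
    have hmeq : m = ['`', '`', '`'] ++ m.drop 3 := by
      conv_lhs => rw [← List.take_append_drop 3 m, ht]
    have hr : PySem.Chars.rstrip m =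
        (List.dropWhile PySem.Chars.isspace ((m.drop 3).reverse ++ ['`', '`', '`'])).reverse := by
      rw [PySem.Chars.rstrip]
      congr 2
      rw [show m.reverse = (['`', '`', '`'] ++ m.drop 3).reverse from by rw [← hmeq]]
      simp
    rw [hr, List.dropWhile_append]
    split
    · have hsp : PySem.Chars.isspace '`' = false := by decide
      have : List.dropWhile PySem.Chars.isspace ['`', '`', '`'] = ['`', '`', '`'] := by
        simp [List.dropWhile, hsp]
      rw [this]
      simp
    · simp [List.reverse_append]

theorem pvFoldRunS (ls : List String) : ∀ (acc : List String) (b : Bool),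
    ls.foldl (fun (st : List String × Bool) line =>
      if PySem.Str.startswith (PySem.Str.strip line) "```" then (st.1 ++ [line], !st.2)
      else if st.2 then (st.1 ++ [line], st.2)
      else (st.1 ++ [PySem.Str.replace (PySem.Str.replace line "{" "\\{") "}" "\\}"], st.2))
      (acc, b) = (acc ++ (pvRunS ls b).1, (pvRunS ls b).2) := by
  induction ls with
  | nil => intro acc b; simp [pvRunS]
  | cons l ls ih =>
    intro acc b
    simp only [List.foldl_cons, pvRunS]
    by_cases h1 : PySem.Str.startswith (PySem.Str.strip l) "```" = true
    · rw [if_pos h1, if_pos h1, ih]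
      simp
    · rw [if_neg h1, if_neg h1]
      by_cases hb : b = true
      · rw [if_pos hb, if_pos hb, ih]
        simp
      · rw [if_neg hb, if_neg hb, ih]
        simp

theorem pvRunS_procA (ls : List String) : ∀ (b : Bool),
    (pvRunS ls b).1.map String.toList = pvProcA (ls.map String.toList) b := by
  induction ls with
  | nil => intro b; simp [pvRunS, pvProcA]
  | cons l ls ih =>
    intro b
    have hcond : PySem.Str.startswith (PySem.Str.strip l) "```" =
        PySem.Chars.startswith (PySem.Chars.strip l.toList) ("```" : String).toList := by
      rw [PySem.Str.startswith_eq, PySem.Str.toList_strip]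
    simp only [List.map_cons, pvRunS, pvProcA, hcond]
    by_cases h1 : PySem.Chars.startswith (PySem.Chars.strip l.toList) ("```" : String).toList = true
    · rw [if_pos h1, if_pos h1]
      simp [ih]
    · rw [if_neg h1, if_neg h1]
      by_cases hb : b = true
      · rw [if_pos hb, if_pos hb]
        simp [ih]
      · rw [if_neg hb, if_neg hb]
        simp [ih, PySem.Str.toList_replace]

theorem pvLineSplit_of_no_nl (cs : List Char) (h : cs.dropWhile (· != '\n') = []) :
    pvLineSplit cs = [cs] := by
  induction cs with
  | nil => simp [pvLineSplit]
  | cons c rest ih =>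
    rw [List.dropWhile_cons] at h
    by_cases hc : c = '\n'
    · simp [hc] at h
    · simp only [hc, bne_iff_ne, ne_eq, not_false_iff, if_pos] at h
      rw [pvLineSplit, if_neg hc, ih (by simpa using h)]
      simp [List.modifyHead]

theorem pvLineSplit_split (cs tail : List Char) (h : cs.dropWhile (· != '\n') = '\n' :: tail) :
    pvLineSplit cs = cs.takeWhile (· != '\n') :: pvLineSplit tail := by
  induction cs with
  | nil => simp at h
  | cons c rest ih =>
    rw [List.dropWhile_cons] at h
    by_cases hc : c = '\n'
    · subst hc
      simp only [bne_self_eq_false, Bool.false_eq_true, if_false, List.cons.injEq] at h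
      rw [pvLineSplit, if_pos rfl, h.2]
      simp
    · simp only [hc, bne_iff_ne, ne_eq, not_false_iff, if_pos] at h
      rw [pvLineSplit, if_neg hc, ih (by simpa using h)]
      simp [List.modifyHead, hc]

theorem pvDropWhileHead : ∀ (cs tail : List Char) (d : Char),
    cs.dropWhile (· != '\n') = d :: tail → d = '\n' := by
  intro cs
  induction cs with
  | nil => intro tail d h; simp at h
  | cons c r ih =>
    intro tail d h
    rw [List.dropWhile_cons] at h
    by_cases hc : c = '\n'
    · subst hc
      simp only [bne_self_eq_false, Bool.false_eq_true, if_false, List.cons.injEq] at h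
      exact h.1.symm
    · simp only [hc, bne_iff_ne, ne_eq, not_false_iff, if_pos] at h
      exact ih tail d h

theorem pvProcA_shape (l : List Char) (ls : List (List Char)) (b : Bool) :
    ∃ v vs, pvProcA (l :: ls) b = v :: vs := by
  rw [pvProcA]
  split_ifs <;> exact ⟨_, _, rfl⟩

theorem pvJoinConsProc (w : List Char) (u : List Char) (us : List (List Char)) (b : Bool) :
    PySem.Chars.join ['\n'] (w :: pvProcA (u :: us) b) =
      w ++ '\n' :: PySem.Chars.join ['\n'] (pvProcA (u :: us) b) := by
  obtain ⟨v, vs, ev⟩ := pvProcA_shape u us b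
  rw [ev, PySem.Chars.join_cons_cons]
  simp

theorem pvMainNil (cs : List Char) (b : Bool) (e : cs.dropWhile (· != '\n') = []) :
    pvScanB cs b = PySem.Chars.join ['\n'] (pvProcA (pvLineSplit cs) b) := by
  have htw : cs.takeWhile (· != '\n') = cs := by
    conv_rhs => rw [← List.takeWhile_append_dropWhile (p := (· != '\n')) (l := cs)]
    rw [e, List.append_nil]
  rw [pvScanB.eq_def]
  dsimp only
  split
  case _ =>
    rw [pvLineSplit_of_no_nl cs e]
    simp only [pvProcA, htw]
    by_cases hf : PySem.Chars.slice (PySem.Chars.lstrip cs) none (some 3) = ("```" : String).toList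
    · rw [if_pos hf, if_pos ((pvFenceIff cs).mpr hf), PySem.Chars.join_singleton]
    · rw [if_neg hf, if_neg (fun hh => hf ((pvFenceIff cs).mp hh))]
      by_cases hb : b = true
      · rw [if_pos hb, if_pos hb, PySem.Chars.join_singleton]
      · rw [if_neg hb, if_neg hb, PySem.Chars.join_singleton, pvReplaceReplace]
  case _ d tail heq =>
    rw [e] at heq
    simp at heq

theorem pvMain (n : Nat) : ∀ (cs : List Char) (b : Bool), cs.length ≤ n →
    pvScanB cs b = PySem.Chars.join ['\n'] (pvProcA (pvLineSplit cs) b) := by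
  induction n with
  | zero =>
    intro cs b h
    have hcs : cs = [] := List.eq_nil_of_length_eq_zero (Nat.le_zero.mp h)
    subst hcs
    exact pvMainNil [] b (by simp)
  | succ n ih =>
    intro cs b h
    cases e : cs.dropWhile (· != '\n') with
    | nil => exact pvMainNil cs b e
    | cons d tail =>
      have hd : d = '\n' := pvDropWhileHead cs tail d e
      subst hd
      have hlen : tail.length ≤ n := by
        have h2 := List.length_dropWhile_le (· != '\n') cs
        rw [e] at h2
        simp only [List.length_cons] at h2
        omega
      have hls := pvLineSplit_split cs tail e
      obtain ⟨u, us, eu⟩ := List.exists_cons_of_ne_nil (pvLineSplit_ne_nil tail)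
      rw [pvScanB.eq_def]
      dsimp only
      split
      case _ heq =>
        rw [e] at heq
        simp at heq
      case _ d2 tail2 heq =>
        rw [e] at heq
        injection heq with hdd htt
        subst htt
        rw [hls]
        simp only [pvProcA]
        by_cases hf : PySem.Chars.slice (PySem.Chars.lstrip (cs.takeWhile (· != '\n'))) none
            (some 3) = ("```" : String).toList
        · rw [if_pos hf, if_pos hf, if_pos ((pvFenceIff _).mpr hf)]
          rw [ih tail (!b) hlen, eu, pvJoinConsProc]
        · rw [if_neg hf, if_neg hf, if_neg (fun hh => hf ((pvFenceIff _).mp hh))]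
          by_cases hb : b = true
          · rw [if_pos hb, if_pos hb]
            rw [ih tail b hlen, eu, pvJoinConsProc]
          · rw [if_neg hb, if_neg hb, pvReplaceReplace]
            rw [ih tail b hlen, eu, pvJoinConsProc]

-- ===== VERDICT (by name: the statement is the Claim_ definition above) =====
theorem escape_curly_braces_spec : Claim_equal_escape_curly_braces := by
  intro content _dom
  show escape_curly_braces content = escape_curly_braces_alt content
  apply String.toList_inj.mp
  unfold escape_curly_braces escape_curly_braces_alt
  have hsep : ("\n" : String).toList = ['\n'] := rfl
  have hsplit := PySem.Str.split?_map content "\n"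
  rw [hsep] at hsplit
  rw [show PySem.Chars.split? content.toList ['\n'] =
      some (PySem.Chars.splitOn content.toList ['\n']) from by rw [PySem.Chars.split?]; simp]
    at hsplit
  cases eS : PySem.Str.split? content "\n" with
  | none => rw [eS] at hsplit; simp at hsplit
  | some L =>
    rw [eS] at hsplit
    simp only [Option.map_some, Option.some.injEq] at hsplit
    simp only [Option.getD_some]
    rw [PySem.Str.toList_join, hsep, pvFoldRunS L [] false]
    simp only [List.nil_append]
    rw [pvRunS_procA L false, hsplit, pvSplitOn_newline, String.toList_ofList]
    exact (pvMain content.toList.length content.toList false (le_refl _)).symm
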